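-- pv_equiv track=rewrite | github.com/cyberseekerx/cs50_practice_code | problem_set5/test_plates/plates.py | correct_digit
-- ===== SOURCE A (Python) =====
-- def correct_digit(s):
--     if not any(char.isdigit()for char in s):
--         return True
--     digits_start = False
--     for char in s:
--         if char.isdigit():
--             digits_start = True
--         elif digits_start:
--             return False
--     return True
-- ===== SOURCE B (Python) =====
-- def correct_digit(s):
--     for i, ch in enumerate(s):
--         if ch.isdigit():
--             return s[i:].isdigit()
--     return True
-- ===== Notes on version B (the rewrite author's own statement) =====
-- stated objective: simpler
-- what changed: Replaces the boolean-flag state machine (with a separate any() pre-scan) by finding the first digit and delegating the rest to a single str.isdigit suffix check, returning immediately at the first digit.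
import Mathlib
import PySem

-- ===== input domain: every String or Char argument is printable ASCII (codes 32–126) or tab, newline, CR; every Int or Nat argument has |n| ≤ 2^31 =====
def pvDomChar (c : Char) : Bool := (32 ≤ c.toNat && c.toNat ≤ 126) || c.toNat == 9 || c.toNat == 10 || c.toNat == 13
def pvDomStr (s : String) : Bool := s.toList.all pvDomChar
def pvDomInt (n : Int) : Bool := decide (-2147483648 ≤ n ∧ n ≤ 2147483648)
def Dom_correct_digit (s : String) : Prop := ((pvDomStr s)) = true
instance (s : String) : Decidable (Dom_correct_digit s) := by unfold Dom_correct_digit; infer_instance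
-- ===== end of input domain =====

-- B replaces A's boolean-flag state machine with find-first-digit then a str.isdigit suffix check (objective: simpler).
-- ===== PORT A =====
def cdLoop : List Char → Bool → Bool
  | [], _ => true
  | c :: rest, flag =>
      if PySem.Chars.isdigit c then cdLoop rest true
      else if flag then false
      else cdLoop rest flag

def correct_digit (s : String) : Bool :=
  if ¬ (s.toList.any PySem.Chars.isdigit) then true
  else cdLoop s.toList false

-- ===== PORT B =====
-- the remaining suffix c :: rest IS s[i:] at position i of the scan
def cdAltLoop : List Char → Bool
  | [] => true
  | c :: rest =>
      if PySem.Chars.isdigit c then PySem.Chars.strIsdigit (c :: rest)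
      else cdAltLoop rest

def correct_digit_alt (s : String) : Bool :=
  cdAltLoop s.toList

-- ===== PRECONDITION & SPEC =====
def Spec_correct_digit (s : String) (out : Bool) : Prop := out = correct_digit_alt s
instance (s : String) (out : Bool) : Decidable (Spec_correct_digit s out) := by unfold Spec_correct_digit; infer_instance

-- ===== CLAIM (what is proved, stated in full; the proofs are below) =====
def Claim_equal_correct_digit : Prop := ∀ (s : String), Dom_correct_digit s → Spec_correct_digit s (correct_digit s)

-- ===== LEMMAS AND PROOFS =====

lemma cdLoop_true_eq_all (l : List Char) : cdLoop l true = l.all PySem.Chars.isdigit := by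
  induction l with
  | nil => rfl
  | cons c rest ih => by_cases h : PySem.Chars.isdigit c = true <;> simp [cdLoop, h, ih]

lemma cdLoop_false_eq_alt (l : List Char) : cdLoop l false = cdAltLoop l := by
  induction l with
  | nil => rfl
  | cons c rest ih =>
      by_cases h : PySem.Chars.isdigit c = true
      · simp [cdLoop, cdAltLoop, h, cdLoop_true_eq_all, PySem.Chars.strIsdigit]
      · simp [cdLoop, cdAltLoop, h, ih]

lemma cdAltLoop_of_no_digit (l : List Char) (h : l.any PySem.Chars.isdigit = false) :
    cdAltLoop l = true := by
  induction l with
  | nil => rfl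
  | cons c rest ih =>
      simp only [List.any_cons, Bool.or_eq_false_iff] at h
      simp [cdAltLoop, h.1, ih h.2]

-- ===== VERDICT (by name: the statement is the Claim_ definition above) =====
theorem correct_digit_spec : Claim_equal_correct_digit := by
  intro s _
  unfold Spec_correct_digit correct_digit correct_digit_alt
  by_cases h : s.toList.any PySem.Chars.isdigit = true
  · simp [h, cdLoop_false_eq_alt]
  · simp only [Bool.not_eq_true] at h
    simp [h, cdAltLoop_of_no_digit _ h]
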